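-- pv_equiv track=rewrite | github.com/eliottcassidy2000/math | 04-computation/f_poly_moment_analysis.py | count_t5
-- ===== SOURCE A (Python) =====
-- from itertools import permutations, combinations
--
-- def count_t5(A, n):
--     t5 = 0
--     for combo in combinations(range(n), 5):
--         for perm in permutations(combo):
--             if all(A[perm[i]][perm[(i+1)%5]] for i in range(5)):
--                 t5 += 1
--                 break
--     return t5
-- ===== SOURCE B (Python) =====
-- from itertools import combinations
--
-- def count_t5(A, n):
--     t5 = 0
--     for combo in combinations(range(n), 5):
--         start = combo[0]
--         def extend(last, unused):
--             if not unused: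
--                 return bool(A[last][start])
--             return any(A[last][w] and extend(w, [u for u in unused if u != w])
--                        for w in unused)
--         if extend(start, list(combo[1:])):
--             t5 += 1
--     return t5
-- ===== Notes on version B (the rewrite author's own statement) =====
-- stated objective: alternative
-- what changed: The per-subset 120-permutation scan is replaced by a pruned backtracking (Hamiltonian-cycle) search that fixes the subset's smallest vertex as the cycle start and only extends a path along existing edges; the outer combinations loop is unchanged.
import Mathlib
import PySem

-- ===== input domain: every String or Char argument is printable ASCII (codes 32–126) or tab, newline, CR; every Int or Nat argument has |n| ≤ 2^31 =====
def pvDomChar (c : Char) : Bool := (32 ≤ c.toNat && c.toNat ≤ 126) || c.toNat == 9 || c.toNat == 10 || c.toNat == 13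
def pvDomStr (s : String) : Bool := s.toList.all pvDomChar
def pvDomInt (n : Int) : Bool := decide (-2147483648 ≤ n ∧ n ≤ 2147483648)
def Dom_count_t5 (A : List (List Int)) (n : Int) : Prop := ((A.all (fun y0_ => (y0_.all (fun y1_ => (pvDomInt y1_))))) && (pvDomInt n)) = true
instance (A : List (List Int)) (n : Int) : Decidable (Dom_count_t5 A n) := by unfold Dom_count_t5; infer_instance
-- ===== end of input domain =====

-- B replaces the 120-permutation scan per 5-subset with a pruned backtracking search for a
-- Hamiltonian cycle fixed to start at the subset's smallest vertex (same count, same outer loop).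

-- ===== PORT A =====
-- shared with port B: truthiness of A[i][j] (both Pythons test exactly this entry)
def pvEdge (M : List (List Int)) (i j : Int) : Bool :=
  (PySem.List.pyGet? ((PySem.List.pyGet? M i).getD []) j).getD 0 != 0

-- itertools.combinations(l, k) (lexicographic subsequences), shared: both Pythons call it
def pvCombos (l : List Int) : Nat → List (List Int)
  | 0 => [[]]
  | k + 1 =>
    match l with
    | [] => []
    | x :: xs => ((pvCombos xs k).map (x :: ·)) ++ pvCombos xs (k + 1)

-- all(A[perm[i]][perm[(i+1)%5]] for i in range(5))
def pvCycA (M : List (List Int)) (p : List Int) : Bool :=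
  (PySem.List.pyRange 0 5 1).all (fun i =>
    pvEdge M ((PySem.List.pyGet? p i).getD 0)
             ((PySem.List.pyGet? p (PySem.Int.mod (i + 1) 5)).getD 0))

-- the inner 'for perm in permutations(combo): if …: t5 += 1; break' loop
def pvFirstCycle (M : List (List Int)) : List (List Int) → Bool
  | [] => false
  | p :: ps => if pvCycA M p then true else pvFirstCycle M ps

def count_t5 (A : List (List Int)) (n : Int) : Int :=
  (pvCombos (PySem.List.pyRange 0 n 1) 5).foldl
    (fun t5 combo => if pvFirstCycle A combo.permutations then t5 + 1 else t5) 0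

-- ===== PORT B =====
-- B's recursive extend(last, unused); the Nat argument is pure fuel (a totality guard:
-- the filtered list is strictly shorter, so with fuel = unused.length it never runs out)
def pvDfs (M : List (List Int)) (start : Int) : Nat → Int → List Int → Bool
  | _, last, [] => pvEdge M last start
  | 0, _, _ :: _ => false
  | fuel + 1, last, u :: us =>
    (u :: us).any fun w => pvEdge M last w && pvDfs M start fuel w ((u :: us).filter (· ≠ w))

def count_t5_alt (A : List (List Int)) (n : Int) : Int :=
  (pvCombos (PySem.List.pyRange 0 n 1) 5).foldl
    (fun t5 combo =>
      match combo with
      | [] => t5          -- unreachable: every combo has 5 elements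
      | v0 :: rest => if pvDfs A v0 rest.length v0 rest then t5 + 1 else t5) 0

-- ===== PRECONDITION & SPEC =====
-- Pre_ excludes the inputs on which Python A hits an IndexError (when n ≥ 5 it indexes
-- A[i][j] for i, j < n); on a few ragged matrices A still returns because all()'s
-- short-circuit or the break happens to skip the short row — that escape is an accident
-- of the enumeration order, and those inputs are excluded too.
def Pre_count_t5 (A : List (List Int)) (n : Int) : Prop :=
  5 ≤ n → (n ≤ (A.length : Int) ∧ ∀ row ∈ A.take n.toNat, n ≤ (row.length : Int))
instance (A : List (List Int)) (n : Int) : Decidable (Pre_count_t5 A n) := by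
  unfold Pre_count_t5; infer_instance

def pvWitness_count_t5 : List (List Int) × Int :=
  ([[0, 1, 0, 0, 0], [0, 0, 1, 0, 0], [0, 0, 0, 1, 0], [0, 0, 0, 0, 1], [1, 0, 0, 0, 0]], 5)

def Spec_count_t5 (A : List (List Int)) (n : Int) (out : Int) : Prop := out = count_t5_alt A n
instance (A : List (List Int)) (n : Int) (out : Int) : Decidable (Spec_count_t5 A n out) := by
  unfold Spec_count_t5; infer_instance

-- ===== CLAIM (what is proved, stated in full; the proofs are below) =====
def Claim_equal_count_t5 : Prop := ∀ (A : List (List Int)) (n : Int), Dom_count_t5 A n → Pre_count_t5 A n → Spec_count_t5 A n (count_t5 A n)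

-- ===== LEMMAS AND PROOFS =====
def pvChain (M : List (List Int)) (last : Int) (p : List Int) (start : Int) : Bool :=
  match p with
  | [] => pvEdge M last start
  | w :: ws => pvEdge M last w && pvChain M w ws start

theorem pvCombos_mem : ∀ {l : List Int} {k : Nat} {c : List Int},
    c ∈ pvCombos l k → c.Sublist l ∧ c.length = k := by
  intro l
  induction l with
  | nil =>
    intro k c h
    cases k with
    | zero =>
      simp only [pvCombos, List.mem_singleton] at h
      subst h; exact ⟨List.Sublist.refl _, rfl⟩
    | succ k => simp [pvCombos] at h
  | cons x xs ih =>
    intro k c h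
    cases k with
    | zero =>
      simp only [pvCombos, List.mem_singleton] at h
      subst h; exact ⟨List.nil_sublist _, rfl⟩
    | succ k =>
      simp only [pvCombos, List.mem_append, List.mem_map] at h
      rcases h with ⟨c', hc', rfl⟩ | h
      · obtain ⟨hs, hl⟩ := ih hc'
        exact ⟨List.Sublist.cons₂ _ hs, by simp [hl]⟩
      · obtain ⟨hs, hl⟩ := ih h
        exact ⟨hs.cons _, hl⟩

theorem pvCycA_explicit (M : List (List Int)) (x0 x1 x2 x3 x4 : Int) :
    pvCycA M [x0, x1, x2, x3, x4] = pvChain M x0 [x1, x2, x3, x4] x0 := by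
  have h : PySem.List.pyRange 0 5 1 = [0, 1, 2, 3, 4] := by decide
  simp [pvCycA, pvChain, h, PySem.List.pyGet?, PySem.List.pyIdx?, PySem.Int.mod]

theorem pvChain_rot (M : List (List Int)) (x0 x1 x2 x3 x4 : Int) :
    pvChain M x1 [x2, x3, x4, x0] x1 = pvChain M x0 [x1, x2, x3, x4] x0 := by
  simp only [pvChain]
  ac_rfl

theorem pvFirstCycle_eq_any (M : List (List Int)) (ps : List (List Int)) :
    pvFirstCycle M ps = ps.any (pvCycA M) := by
  induction ps with
  | nil => rfl
  | cons p ps ih =>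
    cases h : pvCycA M p <;> simp [pvFirstCycle, h, ih]

theorem pvDfs_iff (M : List (List Int)) (start : Int) :
    ∀ (fuel : Nat) (unused : List Int), unused.length ≤ fuel → unused.Nodup → ∀ last,
      (pvDfs M start fuel last unused = true ↔
        ∃ p, p.Perm unused ∧ pvChain M last p start = true) := by
  intro fuel
  induction fuel with
  | zero =>
    intro unused hle _ last
    have : unused = [] := List.length_eq_zero_iff.1 (Nat.le_zero.1 hle)
    subst this
    constructor
    · intro h
      exact ⟨[], List.Perm.refl _, by simpa [pvDfs] using h⟩
    · rintro ⟨p, hp, hc⟩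
      have : p = [] := hp.eq_nil  -- p ~ [] → p = []
      subst this
      simpa [pvDfs] using hc
  | succ fuel ih =>
    intro unused hle hnd last
    match unused with
    | [] =>
      constructor
      · intro h
        exact ⟨[], List.Perm.refl _, by simpa [pvDfs] using h⟩
      · rintro ⟨p, hp, hc⟩
        have : p = [] := hp.eq_nil
        subst this
        simpa [pvDfs] using hc
    | u :: us =>
      have step : pvDfs M start (fuel + 1) last (u :: us) = true ↔
          ∃ w ∈ u :: us, pvEdge M last w = true ∧
            pvDfs M start fuel w ((u :: us).filter (· ≠ w)) = true := by
        simp [pvDfs, List.any_eq_true, Bool.and_eq_true]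
      rw [step]
      constructor
      · rintro ⟨w, hw, he, hrec⟩
        have hfe : (u :: us).filter (· ≠ w) = (u :: us).erase w :=
          by rw [List.Nodup.erase_eq_filter hnd w]; apply List.filter_congr; intro x _; cases hb : x == w <;> simp_all
        rw [hfe] at hrec
        have hlen : ((u :: us).erase w).length ≤ fuel := by
          rw [List.length_erase_of_mem hw]
          simpa using hle
        obtain ⟨p', hp', hc'⟩ := (ih _ hlen (hnd.erase w) w).1 hrec
        refine ⟨w :: p', ?_, ?_⟩
        · exact (hp'.cons w).trans (List.perm_cons_erase hw).symm
        · simpa [pvChain, he] using hc'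
      · rintro ⟨p, hp, hc⟩
        match p with
        | [] => exact absurd hp.symm.eq_nil (by simp)
        | w :: p' =>
          have hw : w ∈ u :: us := hp.mem_iff.1 (by simp)
          have hp' : p'.Perm ((u :: us).erase w) :=
            (List.Perm.cons_inv ((hp.trans (List.perm_cons_erase hw)).symm.symm))
          simp only [pvChain, Bool.and_eq_true] at hc
          refine ⟨w, hw, hc.1, ?_⟩
          have hfe : (u :: us).filter (· ≠ w) = (u :: us).erase w :=
            by rw [List.Nodup.erase_eq_filter hnd w]; apply List.filter_congr; intro x _; cases hb : x == w <;> simp_all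
          rw [hfe]
          have hlen : ((u :: us).erase w).length ≤ fuel := by
            rw [List.length_erase_of_mem hw]
            simpa using hle
          exact (ih _ hlen (hnd.erase w) w).2 ⟨p', hp', hc.2⟩

theorem pvInner_eq (M : List (List Int)) (c : List Int) (hn : c.Nodup) (hl : c.length = 5) :
    pvFirstCycle M c.permutations =
      (match c with
       | [] => false
       | v0 :: rest => pvDfs M v0 rest.length v0 rest) := by
  rcases c with _ | ⟨v0, rest⟩
  · simp at hl
  · have hndr : rest.Nodup := (List.nodup_cons.1 hn).2
    rw [pvFirstCycle_eq_any, Bool.eq_iff_iff, List.any_eq_true]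
    rw [pvDfs_iff M v0 rest.length rest le_rfl hndr v0]
    constructor
    · rintro ⟨p, hmem, hcy⟩
      have hpc : p.Perm (v0 :: rest) := List.mem_permutations.1 hmem
      have hl5 : p.length = 5 := by rw [hpc.length_eq]; exact hl
      obtain ⟨y0, y1, y2, y3, y4, rfl⟩ : ∃ a b cc d e, p = [a, b, cc, d, e] := by
        rcases p with _ | ⟨a, _ | ⟨b, _ | ⟨cc, _ | ⟨d, _ | ⟨e, _ | ⟨f, t⟩⟩⟩⟩⟩⟩ <;>
          first | exact ⟨_, _, _, _, _, rfl⟩ | simp at hl5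
      rw [pvCycA_explicit] at hcy
      have hv0 : v0 ∈ ([y0, y1, y2, y3, y4] : List Int) := hpc.mem_iff.2 (by simp)
      simp only [List.mem_cons, List.not_mem_nil, or_false] at hv0
      rcases hv0 with rfl | rfl | rfl | rfl | rfl
      · exact ⟨[y1, y2, y3, y4], hpc.cons_inv, hcy⟩
      · have hrot : (([y0, v0, y2, y3, y4] : List Int).rotate 1) = [v0, y2, y3, y4, y0] := rfl
        have hq : (([v0, y2, y3, y4, y0] : List Int)).Perm (v0 :: rest) :=
          (hrot ▸ List.rotate_perm [y0, v0, y2, y3, y4] 1).trans hpc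
        refine ⟨[y2, y3, y4, y0], hq.cons_inv, ?_⟩
        rw [pvChain_rot M y0 v0 y2 y3 y4]
        exact hcy
      · have hrot : (([y0, y1, v0, y3, y4] : List Int).rotate 2) = [v0, y3, y4, y0, y1] := rfl
        have hq : (([v0, y3, y4, y0, y1] : List Int)).Perm (v0 :: rest) :=
          (hrot ▸ List.rotate_perm [y0, y1, v0, y3, y4] 2).trans hpc
        refine ⟨[y3, y4, y0, y1], hq.cons_inv, ?_⟩
        rw [pvChain_rot M y1 v0 y3 y4 y0, pvChain_rot M y0 y1 v0 y3 y4]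
        exact hcy
      · have hrot : (([y0, y1, y2, v0, y4] : List Int).rotate 3) = [v0, y4, y0, y1, y2] := rfl
        have hq : (([v0, y4, y0, y1, y2] : List Int)).Perm (v0 :: rest) :=
          (hrot ▸ List.rotate_perm [y0, y1, y2, v0, y4] 3).trans hpc
        refine ⟨[y4, y0, y1, y2], hq.cons_inv, ?_⟩
        rw [pvChain_rot M y2 v0 y4 y0 y1, pvChain_rot M y1 y2 v0 y4 y0,
          pvChain_rot M y0 y1 y2 v0 y4]
        exact hcy
      · have hrot : (([y0, y1, y2, y3, v0] : List Int).rotate 4) = [v0, y0, y1, y2, y3] := rfl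
        have hq : (([v0, y0, y1, y2, y3] : List Int)).Perm (v0 :: rest) :=
          (hrot ▸ List.rotate_perm [y0, y1, y2, y3, v0] 4).trans hpc
        refine ⟨[y0, y1, y2, y3], hq.cons_inv, ?_⟩
        rw [pvChain_rot M y3 v0 y0 y1 y2, pvChain_rot M y2 y3 v0 y0 y1,
          pvChain_rot M y1 y2 y3 v0 y0, pvChain_rot M y0 y1 y2 y3 v0]
        exact hcy
    · rintro ⟨p', hp', hch⟩
      have hl4 : p'.length = 4 := by
        rw [hp'.length_eq]; simpa using hl
      obtain ⟨x1, x2, x3, x4, rfl⟩ : ∃ a b cc d, p' = [a, b, cc, d] := by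
        rcases p' with _ | ⟨a, _ | ⟨b, _ | ⟨cc, _ | ⟨d, _ | ⟨e, t⟩⟩⟩⟩⟩ <;>
          first | exact ⟨_, _, _, _, rfl⟩ | simp at hl4
      refine ⟨v0 :: [x1, x2, x3, x4], List.mem_permutations.2 (hp'.cons v0), ?_⟩
      rw [pvCycA_explicit]
      exact hch

-- ===== VERDICT (by name: the statement is the Claim_ definition above) =====
theorem count_t5_spec : Claim_equal_count_t5 := by
  intro A n _ _
  unfold Spec_count_t5 count_t5 count_t5_alt
  apply PySem.List.foldl_congr_mem'
  intro combo hc acc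
  obtain ⟨hs, hl⟩ := pvCombos_mem hc
  have hnd : combo.Nodup := hs.nodup (PySem.List.nodup_pyRange_one 0 n)
  rcases combo with _ | ⟨v0, rest⟩
  · simp at hl
  · have h := pvInner_eq A (v0 :: rest) hnd hl
    simp only at h
    simp only [h]
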